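-- pv_equiv track=rewrite | github.com/boxucu/aoc-2024 | day 14 Periodic Boundary.py | accumulation_check
-- ===== SOURCE A (Python) =====
-- def accumulation_check(point_set, tolerance):
--     # Define the 8 possible neighbor directions
--     directions = [
--         (-1, 0),
--         (0, -1),
--         (0, 1),
--         (1, 0),
--     ]
--
--     # A function to count neighbors for a given point
--     def count_neighbors(x, y):
--         count = 0
--         for dx, dy in directions:
--             neighbor = (x + dx, y + dy)
--             if neighbor in point_set:
--                 count += 1
--         return count
--
--     # Count the total number of points that have at least one neighbor
--     neighbor_count = 0
--     for x, y in point_set: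
--         if count_neighbors(x, y) > 0:  # If a point has neighbors
--             neighbor_count += 1
--             if neighbor_count > tolerance:  # Early exit if more than 20
--                 return True
--
--     return False
-- ===== SOURCE B (Python) =====
-- def accumulation_check(point_set, tolerance):
--     # Whole-set formulation: the points having at least one axis-adjacent
--     # neighbor are the union, over the four directions, of the point set
--     # intersected with its shift; then count the list entries in that set.
--     pts = set(point_set)
--     with_neighbor = set()
--     for dx, dy in ((-1, 0), (0, -1), (0, 1), (1, 0)):
--         with_neighbor |= pts & {(x - dx, y - dy) for (x, y) in pts}
--     return sum(1 for p in point_set if p in with_neighbor) > tolerance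
-- ===== Notes on version B (the rewrite author's own statement) =====
-- stated objective: alternative
-- what changed: Replaces the per-point direction loop with early exit by whole-set shift/intersect/union operations computing the set of points with a neighbor, then one membership count compared against tolerance.
-- intended difference: On inputs with negative tolerance where no point has an axis-adjacent neighbor in the list, A returns False because its only True path is the early exit inside the counting loop, while B returns True since the neighbor count 0 exceeds a negative tolerance, which is the intended meaning of 'count > tolerance'. — e.g. on accumulation_check([(0, 0)], -1): A returns false, B returns true
import Mathlib
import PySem

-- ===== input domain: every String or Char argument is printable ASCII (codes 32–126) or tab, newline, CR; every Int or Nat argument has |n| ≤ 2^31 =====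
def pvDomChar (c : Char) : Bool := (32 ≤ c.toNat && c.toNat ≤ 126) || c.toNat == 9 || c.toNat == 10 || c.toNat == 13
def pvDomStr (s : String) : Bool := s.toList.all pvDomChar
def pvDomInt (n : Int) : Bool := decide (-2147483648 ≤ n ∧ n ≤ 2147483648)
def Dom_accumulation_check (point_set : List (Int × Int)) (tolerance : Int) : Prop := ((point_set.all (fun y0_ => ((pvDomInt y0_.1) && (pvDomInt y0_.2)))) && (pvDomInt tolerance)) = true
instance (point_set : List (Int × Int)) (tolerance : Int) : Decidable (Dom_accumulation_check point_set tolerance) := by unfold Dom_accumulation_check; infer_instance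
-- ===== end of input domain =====

-- B replaces A's per-point direction loop (with early exit) by whole-set shift/intersect/union
-- operations plus one membership count; return value only, no mutation; intended difference D_
-- where A's early-exit-only False disagrees with count > tolerance for negative tolerance.


-- ===== PORT A =====
def acDirections : List (Int × Int) := [(-1, 0), (0, -1), (0, 1), (1, 0)]

-- count_neighbors(x, y)
def acCountNeighbors (point_set : List (Int × Int)) (x y : Int) : Int :=
  acDirections.foldl (fun count d => if (x + d.1, y + d.2) ∈ point_set then count + 1 else count) 0

-- the 'for x, y in point_set' loop with early exit, carrying neighbor_count
def acLoop (point_set : List (Int × Int)) (tolerance : Int) :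
    List (Int × Int) → Int → Bool
  | [], _ => false
  | p :: rest, neighbor_count =>
    if acCountNeighbors point_set p.1 p.2 > 0 then
      if neighbor_count + 1 > tolerance then true
      else acLoop point_set tolerance rest (neighbor_count + 1)
    else acLoop point_set tolerance rest neighbor_count

def accumulation_check (point_set : List (Int × Int)) (tolerance : Int) : Bool :=
  acLoop point_set tolerance point_set 0

-- ===== PORT B =====
def altWithNeighbor (point_set : List (Int × Int)) : PySem.Set (Int × Int) :=
  let pts : PySem.Set (Int × Int) := PySem.Set.ofList point_set
  [((-1 : Int), (0 : Int)), (0, -1), (0, 1), (1, 0)].foldl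
    (fun acc d =>
      PySem.Set.union acc
        (PySem.Set.inter pts (PySem.Set.ofList (pts.map (fun p => (p.1 - d.1, p.2 - d.2))))))
    PySem.Set.empty

def accumulation_check_alt (point_set : List (Int × Int)) (tolerance : Int) : Bool :=
  let wn := altWithNeighbor point_set
  let n : Int := point_set.foldl (fun c p => if p ∈ wn then c + 1 else c) 0
  decide (n > tolerance)

-- ===== PRECONDITION & SPEC =====
-- On inputs with negative tolerance where no point has an axis-adjacent neighbor in the list,
-- A returns False (its only True path is the early exit inside the counting loop), while B
-- returns True since the count 0 exceeds a negative tolerance — the intended 'count > tolerance'.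
def D_accumulation_check (point_set : List (Int × Int)) (tolerance : Int) : Prop :=
  tolerance < 0 ∧ ∀ p ∈ point_set,
    (p.1 - 1, p.2) ∉ point_set ∧ (p.1, p.2 - 1) ∉ point_set ∧
    (p.1, p.2 + 1) ∉ point_set ∧ (p.1 + 1, p.2) ∉ point_set
instance (point_set : List (Int × Int)) (tolerance : Int) : Decidable (D_accumulation_check point_set tolerance) := by unfold D_accumulation_check; infer_instance

def Spec_accumulation_check (point_set : List (Int × Int)) (tolerance : Int) (out : Bool) : Prop := ¬ D_accumulation_check point_set tolerance → out = accumulation_check_alt point_set tolerance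
instance (point_set : List (Int × Int)) (tolerance : Int) (out : Bool) : Decidable (Spec_accumulation_check point_set tolerance out) := by unfold Spec_accumulation_check; infer_instance

def pvDiffWitness_accumulation_check : (List (Int × Int)) × Int := ([(0, 0)], -1)
def pvDiffWitnessOut_accumulation_check : Bool × Bool := (false, true)

-- ===== CLAIM (what is proved, stated in full; the proofs are below) =====
def Claim_unchanged_accumulation_check : Prop := ∀ (point_set : List (Int × Int)) (tolerance : Int), Dom_accumulation_check point_set tolerance → Spec_accumulation_check point_set tolerance (accumulation_check point_set tolerance)
def Claim_changed_accumulation_check : Prop := Dom_accumulation_check (pvDiffWitness_accumulation_check.1) (pvDiffWitness_accumulation_check.2) ∧ D_accumulation_check (pvDiffWitness_accumulation_check.1) (pvDiffWitness_accumulation_check.2) ∧ accumulation_check (pvDiffWitness_accumulation_check.1) (pvDiffWitness_accumulation_check.2) = pvDiffWitnessOut_accumulation_check.1 ∧ accumulation_check_alt (pvDiffWitness_accumulation_check.1) (pvDiffWitness_accumulation_check.2) = pvDiffWitnessOut_accumulation_check.2 ∧ pvDiffWitnessOut_accumulation_check.1 ≠ pvDiffWitnessOut_accumulation_check.2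
def Claim_exact_accumulation_check : Prop := ∀ (point_set : List (Int × Int)) (tolerance : Int), Dom_accumulation_check point_set tolerance → D_accumulation_check point_set tolerance → accumulation_check point_set tolerance ≠ accumulation_check_alt point_set tolerance

-- ===== LEMMAS AND PROOFS =====

-- the common "this point has a neighbor" predicate
def acHasNb (point_set : List (Int × Int)) (p : Int × Int) : Bool :=
  decide ((p.1 - 1, p.2) ∈ point_set) || decide ((p.1, p.2 - 1) ∈ point_set) ||
  decide ((p.1, p.2 + 1) ∈ point_set) || decide ((p.1 + 1, p.2) ∈ point_set)

lemma acCountNeighbors_pos (ps : List (Int × Int)) (p : Int × Int) :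
    (acCountNeighbors ps p.1 p.2 > 0) = (acHasNb ps p = true) := by
  simp only [acCountNeighbors, acDirections, acHasNb, List.foldl]
  by_cases h1 : (p.1 + -1, p.2 + 0) ∈ ps <;>
  by_cases h2 : (p.1 + 0, p.2 + -1) ∈ ps <;>
  by_cases h3 : (p.1 + 0, p.2 + 1) ∈ ps <;>
  by_cases h4 : (p.1 + 1, p.2 + 0) ∈ ps <;>
    simp_all [show ∀ a : Int, a + 0 = a from fun a => by ring,
      show ∀ a : Int, a + -1 = a - 1 from fun a => by ring]

lemma mem_altWithNeighbor (ps : List (Int × Int)) (p : Int × Int) (hp : p ∈ ps) :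
    (p ∈ altWithNeighbor ps) ↔ acHasNb ps p = true := by
  obtain ⟨px, py⟩ := p
  simp only [altWithNeighbor, List.foldl, acHasNb, PySem.Set.empty,
    PySem.Set.mem_union, PySem.Set.mem_inter, PySem.Set.mem_ofList, List.mem_map,
    List.not_mem_nil, false_or, Bool.or_eq_true, decide_eq_true_eq]
  constructor
  · rintro (((⟨-, ⟨a, b⟩, hq, he⟩ | ⟨-, ⟨a, b⟩, hq, he⟩) | ⟨-, ⟨a, b⟩, hq, he⟩) | ⟨-, ⟨a, b⟩, hq, he⟩) <;>
      injection he with h1 h2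
    · exact Or.inl (Or.inl (Or.inl (by convert hq using 2 <;> omega)))
    · exact Or.inl (Or.inl (Or.inr (by convert hq using 2 <;> omega)))
    · exact Or.inl (Or.inr (by convert hq using 2 <;> omega))
    · exact Or.inr (by convert hq using 2 <;> omega)
  · rintro (((h | h) | h) | h)
    · exact Or.inl (Or.inl (Or.inl ⟨hp, ⟨(px - 1, py), h, by norm_num⟩⟩))
    · exact Or.inl (Or.inl (Or.inr ⟨hp, ⟨(px, py - 1), h, by norm_num⟩⟩))
    · exact Or.inl (Or.inr ⟨hp, ⟨(px, py + 1), h, by norm_num⟩⟩)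
    · exact Or.inr ⟨hp, ⟨(px + 1, py), h, by norm_num⟩⟩

-- A's loop returns true iff at least one qualifying point remains and the final tally exceeds tolerance
lemma acLoop_eq (ps : List (Int × Int)) (tol : Int) :
    ∀ (rest : List (Int × Int)) (nc : Int),
      acLoop ps tol rest nc =
        decide (1 ≤ rest.countP (acHasNb ps) ∧ tol < nc + (rest.countP (acHasNb ps) : Int)) := by
  intro rest
  induction rest with
  | nil => intro nc; simp [acLoop]
  | cons p r ih =>
    intro nc
    simp only [acLoop, acCountNeighbors_pos]
    by_cases hq : acHasNb ps p = true
    · rw [if_pos hq, List.countP_cons, if_pos hq]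
      by_cases ht : nc + 1 > tol
      · rw [if_pos ht]
        have hnn : (0 : Int) ≤ (r.countP (acHasNb ps) : Int) := Int.natCast_nonneg _
        symm; rw [decide_eq_true_eq]
        refine ⟨by omega, by push_cast; omega⟩
      · rw [if_neg ht, ih (nc + 1)]
        rw [decide_eq_decide]
        rcases Nat.eq_zero_or_pos (r.countP (acHasNb ps)) with h0 | h1
        · rw [h0]; norm_num; omega
        · have h1' : (1 : Int) ≤ (r.countP (acHasNb ps) : Int) := by exact_mod_cast h1
          push_cast
          simp only [true_and]
          constructor
          · rintro ⟨h1c, hc⟩; omega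
          · intro hc; exact ⟨by omega, by omega⟩
    · rw [if_neg hq, List.countP_cons, if_neg hq, ih nc]; ring_nf

lemma alt_count_eq (ps full : List (Int × Int)) (hsub : ∀ p ∈ ps, p ∈ full) :
    ps.foldl (fun c p => if p ∈ altWithNeighbor full then c + 1 else c) (0 : Int)
      = (ps.countP (acHasNb full) : Int) := by
  rw [PySem.List.foldl_ite_add_one]
  norm_num
  exact List.countP_congr fun p hp => by
    simp [mem_altWithNeighbor full p (hsub p hp)]

-- D_ holds exactly when no list entry satisfies acHasNb
lemma D_iff_countP_zero (ps : List (Int × Int)) (tol : Int) :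
    D_accumulation_check ps tol ↔ tol < 0 ∧ ps.countP (acHasNb ps) = 0 := by
  rw [D_accumulation_check, List.countP_eq_zero]
  refine and_congr_right fun _ => forall₂_congr fun p hp => ?_
  simp [acHasNb, not_or]; tauto

-- ===== VERDICT (by name: the statement is the Claim_ definition above) =====
theorem accumulation_check_spec : Claim_unchanged_accumulation_check := by
  intro ps tol _ hD
  show accumulation_check ps tol = accumulation_check_alt ps tol
  rw [accumulation_check, acLoop_eq]
  simp only [accumulation_check_alt]
  rw [alt_count_eq ps ps (fun _ h => h)]
  rw [D_iff_countP_zero, not_and_or] at hD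
  rw [decide_eq_decide]
  rcases hD with h | h
  · rcases Nat.eq_zero_or_pos (ps.countP (acHasNb ps)) with h0 | h1
    · rw [h0]; push_cast; omega
    · have : (1 : Int) ≤ (ps.countP (acHasNb ps) : Int) := by exact_mod_cast h1
      constructor
      · rintro ⟨_, hc⟩; omega
      · intro hc; exact ⟨by omega, by omega⟩
  · have h1 : 0 < ps.countP (acHasNb ps) := Nat.pos_of_ne_zero h
    have : (1 : Int) ≤ (ps.countP (acHasNb ps) : Int) := by exact_mod_cast h1
    constructor
    · rintro ⟨_, hc⟩; omega
    · intro hc; exact ⟨by omega, by omega⟩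

theorem accumulation_check_changed : Claim_changed_accumulation_check := by
  unfold Claim_changed_accumulation_check; decide

theorem accumulation_check_tight : Claim_exact_accumulation_check := by
  intro ps tol _ hD
  rw [D_iff_countP_zero] at hD
  obtain ⟨htol, hc⟩ := hD
  rw [accumulation_check, acLoop_eq]
  simp only [accumulation_check_alt]
  rw [alt_count_eq ps ps (fun _ h => h), hc]
  simp
  omega
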